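-- pv_equiv track=rewrite | github.com/juniormartinxo/code-compass | apps/indexer/indexer/chunk_ts.py | _line_start_depths
-- ===== SOURCE A (Python) =====
-- def _line_start_depths(sanitized_lines: list[str]) -> list[int] | None:
--     depth = 0
--     depths: list[int] = []
--
--     for line in sanitized_lines:
--         depths.append(depth)
--         for char in line:
--             if char == "{":
--                 depth += 1
--                 continue
--             if char == "}":
--                 depth -= 1
--                 if depth < 0:
--                     return None
--
--     if depth != 0:
--         return None
--
--     return depths
-- ===== SOURCE B (Python) =====
-- def _line_start_depths(sanitized_lines: list[str]) -> list[int] | None: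
--     # Flat per-character delta list, prefix sums, then read depths at line-start offsets.
--     deltas = []
--     for line in sanitized_lines:
--         for c in line:
--             deltas.append(1 if c == "{" else (-1 if c == "}" else 0))
--     prefix = [0]
--     for d in deltas:
--         prefix.append(prefix[-1] + d)
--     if any(p < 0 for p in prefix) or prefix[-1] != 0:
--         return None
--     res = []
--     off = 0
--     for line in sanitized_lines:
--         res.append(prefix[off])
--         off += len(line)
--     return res
-- ===== Notes on version B (the rewrite author's own statement) =====
-- stated objective: alternative
-- what changed: A interleaves depth tracking with output in one nested loop with early returns; B builds a flat per-character delta list, takes prefix sums once, validates them globally (no negative prefix, zero total), and reads line-start depths off the prefix array at cumulative offsets.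
import Mathlib
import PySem

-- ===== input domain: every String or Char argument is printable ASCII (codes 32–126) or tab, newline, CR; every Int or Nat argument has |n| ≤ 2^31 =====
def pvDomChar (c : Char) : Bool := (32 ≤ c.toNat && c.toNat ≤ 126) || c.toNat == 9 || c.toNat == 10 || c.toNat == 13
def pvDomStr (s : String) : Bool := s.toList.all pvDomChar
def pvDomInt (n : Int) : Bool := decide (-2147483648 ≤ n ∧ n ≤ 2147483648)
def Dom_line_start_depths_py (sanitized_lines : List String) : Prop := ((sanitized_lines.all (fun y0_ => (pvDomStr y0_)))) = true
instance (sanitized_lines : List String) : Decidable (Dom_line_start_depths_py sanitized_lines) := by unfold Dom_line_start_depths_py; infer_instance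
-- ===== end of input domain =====

-- B replaces A's interleaved two-level scan with flat per-character prefix sums
-- validated once and read off at line-start offsets (alternative decomposition, same cost).

-- ===== PORT A =====
-- inner 'for char in line' loop with the early 'return None'
def pvAScanLine (depth : Int) : List Char → Option Int
  | [] => some depth
  | c :: cs =>
    if c = '{' then pvAScanLine (depth + 1) cs
    else if c = '}' then
      if depth - 1 < 0 then none else pvAScanLine (depth - 1) cs
    else pvAScanLine depth cs

-- outer 'for line in sanitized_lines' loop carrying (depth, depths)
def pvALoop : List String → Int → List Int → Option (List Int)
  | [], depth, depths => if depth ≠ 0 then none else some depths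
  | line :: rest, depth, depths =>
    match pvAScanLine depth line.toList with
    | none => none
    | some d => pvALoop rest d (depths ++ [depth])

def line_start_depths_py (sanitized_lines : List String) : Option (List Int) :=
  pvALoop sanitized_lines 0 []

-- ===== PORT B =====
def pvBDelta (c : Char) : Int := if c = '{' then 1 else if c = '}' then -1 else 0

def line_start_depths_py_alt (sanitized_lines : List String) : Option (List Int) :=
  -- deltas: nested append loop in Source B = flatten of per-line delta lists
  let deltas := (sanitized_lines.map (fun l => l.toList.map pvBDelta)).flatten
  let pre := deltas.foldl (fun p d => p ++ [p.getLastD 0 + d]) [0]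
  if pre.any (fun p => p < 0) || pre.getLastD 0 != 0 then none
  else
    -- offsets are always < pre.length (one prefix entry per char plus one), so getD's default is never used
    let st := sanitized_lines.foldl
      (fun (st : List Int × Nat) line => (st.1 ++ [pre.getD st.2 0], st.2 + line.toList.length))
      (([] : List Int), 0)
    some st.1

-- ===== PRECONDITION & SPEC =====
def Spec_line_start_depths_py (sanitized_lines : List String) (out : Option (List Int)) : Prop := out = line_start_depths_py_alt sanitized_lines
instance (sanitized_lines : List String) (out : Option (List Int)) : Decidable (Spec_line_start_depths_py sanitized_lines out) := by unfold Spec_line_start_depths_py; infer_instance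

-- ===== CLAIM (what is proved, stated in full; the proofs are below) =====
def Claim_equal_line_start_depths_py : Prop := ∀ (sanitized_lines : List String), Dom_line_start_depths_py sanitized_lines → Spec_line_start_depths_py sanitized_lines (line_start_depths_py sanitized_lines)

-- ===== LEMMAS AND PROOFS =====

-- prefix-sum list of a delta list, starting value d (includes d itself)
def pvPres (d : Int) : List Int → List Int
  | [] => [d]
  | x :: xs => d :: pvPres (d + x) xs

def pvPreL (d : Int) (cs : List Char) : List Int := pvPres d (cs.map pvBDelta)

def pvSumD (cs : List Char) : Int := (cs.map pvBDelta).sum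

def pvFlat (lines : List String) : List Char := (lines.map String.toList).flatten

-- line-start depths, the intended result
def pvStarts (d : Int) : List String → List Int
  | [] => []
  | l :: ls => d :: pvStarts (d + pvSumD l.toList) ls

theorem pvPreL_nil (d : Int) : pvPreL d [] = [d] := rfl

theorem pvPreL_cons (d : Int) (c : Char) (cs : List Char) :
    pvPreL d (c :: cs) = d :: pvPreL (d + pvBDelta c) cs := rfl

theorem pvSumD_cons (c : Char) (cs : List Char) :
    pvSumD (c :: cs) = pvBDelta c + pvSumD cs := by simp [pvSumD]

theorem pvSumD_append (xs ys : List Char) :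
    pvSumD (xs ++ ys) = pvSumD xs + pvSumD ys := by simp [pvSumD]

theorem pvPres_head (d : Int) (xs : List Int) : ∃ t, pvPres d xs = d :: t := by
  cases xs <;> exact ⟨_, rfl⟩

theorem pvPreL_head (d : Int) (cs : List Char) : ∃ t, pvPreL d cs = d :: t :=
  pvPres_head d _

theorem pvFoldl_pre (ds : List Int) (acc : List Int) (d : Int) :
    ds.foldl (fun p x => p ++ [p.getLastD 0 + x]) (acc ++ [d]) = acc ++ pvPres d ds := by
  induction ds generalizing acc d with
  | nil => simp [pvPres]
  | cons x xs ih =>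
    simp only [List.foldl_cons, List.getLastD_concat]
    have : (acc ++ [d]) ++ [d + x] = (acc ++ [d]) ++ [d + x] := rfl
    calc xs.foldl (fun p x => p ++ [p.getLastD 0 + x]) ((acc ++ [d]) ++ [d + x])
        = (acc ++ [d]) ++ pvPres (d + x) xs := ih (acc ++ [d]) (d + x)
      _ = acc ++ pvPres d (x :: xs) := by simp [pvPres]

theorem pvPreL_getLastD (d : Int) (cs : List Char) :
    (pvPreL d cs).getLastD 0 = d + pvSumD cs := by
  induction cs generalizing d with
  | nil => simp [pvPreL_nil, pvSumD]
  | cons c cs ih =>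
    obtain ⟨t, ht⟩ := pvPreL_head (d + pvBDelta c) cs
    have h2 := ih (d + pvBDelta c)
    rw [ht] at h2
    rw [List.getLastD_cons] at h2
    rw [pvPreL_cons, pvSumD_cons, ht, List.getLastD_cons, List.getLastD_cons, h2]
    ring

theorem pvPreL_last_mem (d : Int) (cs : List Char) :
    d + pvSumD cs ∈ pvPreL d cs := by
  induction cs generalizing d with
  | nil => simp [pvPreL_nil, pvSumD]
  | cons c cs ih =>
    rw [pvPreL_cons, pvSumD_cons]
    have := ih (d + pvBDelta c)
    simp only [List.mem_cons]
    right
    have h : d + (pvBDelta c + pvSumD cs) = d + pvBDelta c + pvSumD cs := by ring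
    rw [h]; exact this

theorem pvAny_preL_append (d : Int) (xs ys : List Char) (p : Int → Bool) :
    (pvPreL d (xs ++ ys)).any p = ((pvPreL d xs).any p || (pvPreL (d + pvSumD xs) ys).any p) := by
  induction xs generalizing d with
  | nil =>
    obtain ⟨t, ht⟩ := pvPreL_head d ys
    simp only [List.nil_append, pvPreL_nil, pvSumD, List.map_nil, List.sum_nil, add_zero, ht,
      List.any_cons, List.any_nil, Bool.or_false]
    cases p d <;> simp
  | cons c cs ih =>
    simp only [List.cons_append, pvPreL_cons, List.any_cons, ih (d + pvBDelta c), pvSumD_cons]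
    have h : d + pvBDelta c + pvSumD cs = d + (pvBDelta c + pvSumD cs) := by ring
    rw [h, Bool.or_assoc]

theorem pvPreL_drop (d : Int) (xs ys : List Char) :
    (pvPreL d (xs ++ ys)).drop xs.length = pvPreL (d + pvSumD xs) ys := by
  induction xs generalizing d with
  | nil => simp [pvSumD]
  | cons c cs ih =>
    simp only [List.cons_append, pvPreL_cons, List.length_cons, List.drop_succ_cons, ih, pvSumD_cons]
    have h : d + pvBDelta c + pvSumD cs = d + (pvBDelta c + pvSumD cs) := by ring
    rw [h]

theorem pvGetD_of_drop (pre : List Int) (off : Nat) (d : Int) (t : List Int)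
    (h : pre.drop off = d :: t) : pre.getD off 0 = d := by
  have h1 : pre[off]? = some d := by rw [← List.head?_drop, h]; rfl
  simp [List.getD_eq_getElem?_getD, h1]

-- A's inner scan in closed form: None iff some prefix depth dips below 0
theorem pvScan_closed (cs : List Char) (d : Int) (hd : 0 ≤ d) :
    pvAScanLine d cs =
      if (pvPreL d cs).any (fun p => p < 0) then none else some (d + pvSumD cs) := by
  induction cs generalizing d with
  | nil =>
    simp only [pvAScanLine, pvPreL_nil, List.any_cons, List.any_nil, Bool.or_false]
    have : ¬ (d < 0) := by omega
    simp [this, pvSumD]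
  | cons c cs ih =>
    rw [pvPreL_cons, pvSumD_cons]
    have hnd : ¬ (d < 0) := by omega
    simp only [pvAScanLine, List.any_cons, hnd, decide_false, Bool.false_or]
    by_cases h1 : c = '{'
    · rw [if_pos h1, ih (d + 1) (by omega)]
      have hδ : pvBDelta c = 1 := by simp [pvBDelta, h1]
      rw [hδ]
      split <;> simp <;> try ring
    · rw [if_neg h1]
      by_cases h2 : c = '}'
      · rw [if_pos h2]
        have hδ : pvBDelta c = -1 := by simp [pvBDelta, h2]
        rw [hδ]
        by_cases h3 : d - 1 < 0
        · rw [if_pos h3]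
          obtain ⟨t, ht⟩ := pvPreL_head (d + -1) cs
          have : d + -1 < 0 := by omega
          simp [ht, this]
        · rw [if_neg h3, ih (d - 1) (by omega)]
          have he : d - 1 = d + -1 := by ring
          rw [he]
          split <;> simp <;> try ring
      · rw [if_neg h2]
        have hδ : pvBDelta c = 0 := by simp [pvBDelta, h1, h2]
        rw [hδ, ih d hd]
        simp

-- A's outer loop in closed form over the flat character stream
theorem pvALoop_closed (lines : List String) (d : Int) (depths : List Int) (hd : 0 ≤ d) :
    pvALoop lines d depths =
      if (pvPreL d (pvFlat lines)).any (fun p => p < 0) then none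
      else if d + pvSumD (pvFlat lines) ≠ 0 then none
      else some (depths ++ pvStarts d lines) := by
  induction lines generalizing d depths with
  | nil =>
    have hnd : ¬ (d < 0) := by omega
    simp [pvALoop, pvFlat, pvPreL_nil, pvSumD, pvStarts, hnd]
  | cons l ls ih =>
    have hflat : pvFlat (l :: ls) = l.toList ++ pvFlat ls := by simp [pvFlat]
    rw [hflat, pvAny_preL_append, pvSumD_append]
    simp only [pvALoop, pvScan_closed l.toList d hd]
    by_cases h1 : (pvPreL d l.toList).any (fun p => p < 0)
    · simp [h1]
    · have h1' : (pvPreL d l.toList).any (fun p => p < 0) = false := by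
        cases h : (pvPreL d l.toList).any (fun p => p < 0)
        · rfl
        · exact absurd h h1
      have hd' : 0 ≤ d + pvSumD l.toList := by
        have hmem := pvPreL_last_mem d l.toList
        have := (List.any_eq_false.mp h1') _ hmem
        simpa using this
      simp only [h1', Bool.false_or, Bool.false_eq_true, if_false]
      show pvALoop ls (d + pvSumD l.toList) (depths ++ [d]) = _
      rw [ih (d + pvSumD l.toList) (depths ++ [d]) hd']
      have hsum : d + pvSumD l.toList + pvSumD (pvFlat ls) = d + (pvSumD l.toList + pvSumD (pvFlat ls)) := by ring
      rw [hsum]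
      split
      · rfl
      · split
        · rfl
        · simp [pvStarts]

-- B's read loop returns the line-start depths
theorem pvReadLoop (lines : List String) (pre : List Int) (off : Nat) (res : List Int) (d : Int)
    (h : pre.drop off = pvPreL d (pvFlat lines)) :
    (lines.foldl (fun (st : List Int × Nat) line => (st.1 ++ [pre.getD st.2 0], st.2 + line.toList.length))
      (res, off)).1 = res ++ pvStarts d lines := by
  induction lines generalizing off res d with
  | nil => simp [pvStarts]
  | cons l ls ih =>
    have hflat : pvFlat (l :: ls) = l.toList ++ pvFlat ls := by simp [pvFlat]
    rw [hflat] at h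
    obtain ⟨t, ht⟩ := pvPreL_head d (l.toList ++ pvFlat ls)
    have hget : pre.getD off 0 = d := pvGetD_of_drop pre off d t (by rw [h, ht])
    have hdrop : pre.drop (off + l.toList.length) = pvPreL (d + pvSumD l.toList) (pvFlat ls) := by
      rw [← List.drop_drop, h, pvPreL_drop]
    simp only [List.foldl_cons, hget]
    rw [ih (off + l.toList.length) (res ++ [d]) (d + pvSumD l.toList) hdrop]
    simp [pvStarts]

theorem pvB_closed (ls : List String) :
    line_start_depths_py_alt ls =
      if (pvPreL 0 (pvFlat ls)).any (fun p => p < 0) then none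
      else if (0 : Int) + pvSumD (pvFlat ls) ≠ 0 then none
      else some (([] : List Int) ++ pvStarts 0 ls) := by
  unfold line_start_depths_py_alt
  have hdeltas : (ls.map (fun l => l.toList.map pvBDelta)).flatten = (pvFlat ls).map pvBDelta := by
    simp [pvFlat, List.map_flatten, List.map_map]; rfl
  have hpre : ((ls.map (fun l => l.toList.map pvBDelta)).flatten).foldl
      (fun p d => p ++ [p.getLastD 0 + d]) [0] = pvPreL 0 (pvFlat ls) := by
    rw [hdeltas]
    have := pvFoldl_pre ((pvFlat ls).map pvBDelta) [] 0
    simpa [pvPreL] using this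
  simp only [hpre]
  rw [pvPreL_getLastD]
  by_cases h1 : (pvPreL 0 (pvFlat ls)).any (fun p => p < 0)
  · simp [h1]
  · have h1' : ((pvPreL 0 (pvFlat ls)).any fun p => p < 0) = false := by
      cases h : ((pvPreL 0 (pvFlat ls)).any fun p => p < 0)
      · rfl
      · exact absurd h h1
    simp only [h1', Bool.false_or, Bool.false_eq_true, if_false]
    by_cases h2 : (0 : Int) + pvSumD (pvFlat ls) = 0
    · have hL : (((0 : Int) + pvSumD (pvFlat ls)) != 0) = false := by simp [h2]
      rw [hL, if_neg (show ¬ (((0 : Int) + pvSumD (pvFlat ls)) ≠ 0) from by omega)]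
      simp only [Bool.false_eq_true, if_false]
      have hr := pvReadLoop ls (pvPreL 0 (pvFlat ls)) 0 ([] : List Int) 0 (by simp)
      rw [hr]
    · have hL : (((0 : Int) + pvSumD (pvFlat ls)) != 0) = true := by
        simp [bne_iff_ne]; omega
      rw [hL, if_pos rfl, if_pos h2]

-- ===== VERDICT (by name: the statement is the Claim_ definition above) =====
theorem line_start_depths_py_spec : Claim_equal_line_start_depths_py := by
  intro ls _
  unfold Spec_line_start_depths_py line_start_depths_py
  rw [pvALoop_closed ls 0 [] le_rfl, pvB_closed]
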